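-- pv_equiv track=rewrite | github.com/Liam-Woods-8/document-qa | lab4.py | conversation_buffer
-- ===== SOURCE A (Python) =====
-- def conversation_buffer(messages, keep_user_message=2):
--     if not messages:
--         return messages
--
--     # keep system prompt
--     system = []
--     if messages[0]["role"] == "system":
--         system = [messages[0]]
--
--     # find user messages
--     user_indices = [i for i, m in enumerate(messages) if m["role"] == "user"]
--
--     # if <= 2 user messages, keep all
--     if len(user_indices) <= keep_user_message:
--         return messages
--
--     # keep last 2 user turns + responses
--     start_index = user_indices[-keep_user_message]
--     return system + messages[start_index:]
-- ===== SOURCE B (Python) =====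
-- def conversation_buffer(messages, keep_user_message=2):
--     if not messages:
--         return messages
--
--     # keep system prompt
--     system = [messages[0]] if messages[0]["role"] == "system" else []
--
--     # single backward scan: count user turns from the end; 'start' is the
--     # position of the most recent group of keep_user_message user turns
--     count = 0
--     start = len(messages)
--     for offset, m in enumerate(reversed(messages)):
--         if m["role"] == "user":
--             count += 1
--             if count > keep_user_message:
--                 return system + messages[start:]
--             start = len(messages) - 1 - offset
--
--     # fewer user turns than the limit: keep everything
--     return messages
-- ===== Notes on version B (the rewrite author's own statement) =====
-- stated objective: alternative
-- what changed: Replaces the full index-table pass (build the list of all user-message indices, then subscript it from the end) with a single backward scan that keeps only an integer counter and the last candidate start position, stopping as soon as one user turn too many is seen.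
-- intended difference: For keep_user_message == 0 with at least one user message, A (via Python's -0 == 0) returns the system prompt plus everything from the FIRST user turn onward, i.e. essentially the whole history; B returns just the system prompt, which is the intended meaning of keeping zero user turns. — e.g. on conversation_buffer([[("role", "user"), ("content", "q")]], 0): A returns [[("role", "user"), ("content", "q")]], B returns []
-- outside the precondition, e.g. on conversation_buffer([{'role': 'user'}, {'role': 'user'}], -1): A returns [{'role': 'user'}], B returns []
import Mathlib
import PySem

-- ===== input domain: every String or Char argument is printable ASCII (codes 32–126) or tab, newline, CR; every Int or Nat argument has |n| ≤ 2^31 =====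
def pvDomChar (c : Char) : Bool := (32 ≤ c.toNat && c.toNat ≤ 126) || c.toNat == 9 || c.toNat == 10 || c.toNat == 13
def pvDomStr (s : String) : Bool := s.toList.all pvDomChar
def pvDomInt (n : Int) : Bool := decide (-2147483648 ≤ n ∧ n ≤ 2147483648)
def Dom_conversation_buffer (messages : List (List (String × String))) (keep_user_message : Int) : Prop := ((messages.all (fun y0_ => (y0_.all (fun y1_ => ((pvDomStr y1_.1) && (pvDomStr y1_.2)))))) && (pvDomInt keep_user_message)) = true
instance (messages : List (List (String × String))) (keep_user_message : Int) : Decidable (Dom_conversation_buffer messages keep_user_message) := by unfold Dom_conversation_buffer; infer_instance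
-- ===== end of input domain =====

-- B replaces A's full index-table pass by a single backward scan with a counter; for
-- keep_user_message = 0 with user turns present B returns just the system prompt (intended),
-- where A's -0 == 0 quirk keeps everything from the first user turn (stated as D_ below).


-- m["role"]: first-match association-list lookup; exact under Pre_ (the key is present)
def pvRole (m : List (String × String)) : String :=
  PySem.Dict.getD (PySem.Dict.mk m) "role" ""

-- ===== PORT A =====
def conversation_buffer (messages : List (List (String × String))) (keep_user_message : Int) : List (List (String × String)) :=
  if messages = [] then messages
  else
    let system : List (List (String × String)) :=
      if pvRole (messages.headD []) = "system" then [messages.headD []] else []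
    let user_indices : List Int :=
      ((PySem.List.enumerate messages 0).filter (fun p => pvRole p.2 = "user")).map (fun p => p.1)
    if (user_indices.length : Int) ≤ keep_user_message then messages
    else
      match PySem.List.pyGet? user_indices (-keep_user_message) with
      | some start => system ++ PySem.List.slice messages (some start) none
      | none => []  -- IndexError in Python; excluded by Pre_

-- ===== PORT B =====
-- the backward for-loop of Source B over enumerate(reversed(messages)) with early return
def cbScan (messages system : List (List (String × String))) (keep : Int) :
    List (Int × List (String × String)) → Int → Int → List (List (String × String))
  | [], _, _ => messages
  | (offset, m) :: rest, count, start =>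
    if pvRole m = "user" then
      if count + 1 > keep then system ++ PySem.List.slice messages (some start) none
      else cbScan messages system keep rest (count + 1) ((messages.length : Int) - 1 - offset)
    else cbScan messages system keep rest count start

def conversation_buffer_alt (messages : List (List (String × String))) (keep_user_message : Int) : List (List (String × String)) :=
  if messages = [] then messages
  else
    let system : List (List (String × String)) :=
      if pvRole (messages.headD []) = "system" then [messages.headD []] else []
    cbScan messages system keep_user_message
      (PySem.List.enumerate messages.reverse 0) 0 (messages.length : Int)

-- ===== PRECONDITION & SPEC =====
-- Pre_ excludes, for nonempty message lists only, negative keep_user_message (a negative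
-- count is outside the natural domain: A then index-wraps into the user-index list or raises
-- IndexError) and messages lacking a "role" key (A raises KeyError).
def Pre_conversation_buffer (messages : List (List (String × String))) (keep_user_message : Int) : Prop :=
  messages = [] ∨ (0 ≤ keep_user_message ∧ ∀ m ∈ messages, (PySem.Dict.mk m).contains "role" = true)
instance (messages : List (List (String × String))) (keep_user_message : Int) : Decidable (Pre_conversation_buffer messages keep_user_message) := by unfold Pre_conversation_buffer; infer_instance

def pvWitness_conversation_buffer : (List (List (String × String))) × Int :=
  ([[("role", "system"), ("content", "s")], [("role", "user"), ("content", "q")]], 2)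

-- For keep_user_message = 0 with at least one user message, A (via Python's -0 == 0) returns
-- the system prompt plus everything from the first user turn onward; B returns just the system
-- prompt, the intended meaning of keeping zero user turns.
def D_conversation_buffer (messages : List (List (String × String))) (keep_user_message : Int) : Prop :=
  keep_user_message = 0 ∧ ∃ m ∈ messages, PySem.Dict.getD (PySem.Dict.mk m) "role" "" = "user"
instance (messages : List (List (String × String))) (keep_user_message : Int) : Decidable (D_conversation_buffer messages keep_user_message) := by unfold D_conversation_buffer; infer_instance

def Spec_conversation_buffer (messages : List (List (String × String))) (keep_user_message : Int) (out : List (List (String × String))) : Prop := ¬ D_conversation_buffer messages keep_user_message → out = conversation_buffer_alt messages keep_user_message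
instance (messages : List (List (String × String))) (keep_user_message : Int) (out : List (List (String × String))) : Decidable (Spec_conversation_buffer messages keep_user_message out) := by unfold Spec_conversation_buffer; infer_instance

def pvDiffWitness_conversation_buffer : (List (List (String × String))) × Int :=
  ([[("role", "user"), ("content", "q")]], 0)
def pvDiffWitnessOut_conversation_buffer : (List (List (String × String))) × (List (List (String × String))) :=
  ([[("role", "user"), ("content", "q")]], [])

-- ===== CLAIM (what is proved, stated in full; the proofs are below) =====
def Claim_unchanged_conversation_buffer : Prop := ∀ (messages : List (List (String × String))) (keep_user_message : Int), Dom_conversation_buffer messages keep_user_message → Pre_conversation_buffer messages keep_user_message → Spec_conversation_buffer messages keep_user_message (conversation_buffer messages keep_user_message)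
def Claim_changed_conversation_buffer : Prop := Dom_conversation_buffer (pvDiffWitness_conversation_buffer.1) (pvDiffWitness_conversation_buffer.2) ∧ Pre_conversation_buffer (pvDiffWitness_conversation_buffer.1) (pvDiffWitness_conversation_buffer.2) ∧ D_conversation_buffer (pvDiffWitness_conversation_buffer.1) (pvDiffWitness_conversation_buffer.2) ∧ conversation_buffer (pvDiffWitness_conversation_buffer.1) (pvDiffWitness_conversation_buffer.2) = pvDiffWitnessOut_conversation_buffer.1 ∧ conversation_buffer_alt (pvDiffWitness_conversation_buffer.1) (pvDiffWitness_conversation_buffer.2) = pvDiffWitnessOut_conversation_buffer.2 ∧ pvDiffWitnessOut_conversation_buffer.1 ≠ pvDiffWitnessOut_conversation_buffer.2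
def Claim_exact_conversation_buffer : Prop := ∀ (messages : List (List (String × String))) (keep_user_message : Int), Dom_conversation_buffer messages keep_user_message → Pre_conversation_buffer messages keep_user_message → D_conversation_buffer messages keep_user_message → conversation_buffer messages keep_user_message ≠ conversation_buffer_alt messages keep_user_message

-- ===== LEMMAS AND PROOFS =====
theorem pv_rev_filter (xs : List (List (String × String))) (s c : Int) :
    ((PySem.List.enumerate xs.reverse s).filter (fun p => pvRole p.2 = "user")).map (fun p => c - p.1)
    = (((PySem.List.enumerate xs (c - s - xs.length + 1)).filter (fun p => pvRole p.2 = "user")).map (fun p => p.1)).reverse := by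
  induction xs with
  | nil => simp [PySem.List.enumerate_nil]
  | cons x t ih =>
    rw [List.reverse_cons, PySem.List.enumerate_append, List.filter_append, List.map_append, ih]
    have hb : c - s - ((x :: t).length : Int) + 1 = c - s - (t.length : Int) := by
      push_cast [List.length_cons]; omega
    rw [hb]
    have hsx : PySem.List.enumerate [x] (s + ((t.reverse).length : Int))
        = [((s + (t.length : Int)), x)] := by
      simp [PySem.List.enumerate_cons, PySem.List.enumerate_nil]
    rw [hsx]
    rw [show c - s - (t.length : Int) = (c - s - (t.length : Int) - 1) + 1 by ring] at *
    rw [PySem.List.enumerate_cons]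
    by_cases hx : pvRole x = "user"
    · rw [List.filter_cons_of_pos (by simp [hx]), List.filter_cons_of_pos (by simp [hx])]
      rw [List.map_cons, List.map_cons, List.reverse_cons]
      simp only [List.filter_nil, List.map_nil]
      congr 2
      ring
    · rw [List.filter_cons_of_neg (by simp [hx]), List.filter_cons_of_neg (by simp [hx])]
      simp

theorem pv_scanSpec (M sys : List (List (String × String))) (k : Int)
    (xs : List (List (String × String))) :
    ∀ (s c st : Int), 0 ≤ c → c ≤ k →
    cbScan M sys k (PySem.List.enumerate xs s) c st =
      (if ((((PySem.List.enumerate xs s).filter (fun p => pvRole p.2 = "user")).map (fun p => (M.length : Int) - 1 - p.1)).length : Int) + c ≤ k then M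
       else sys ++ PySem.List.slice M (some (if c = k then st
         else (((PySem.List.enumerate xs s).filter (fun p => pvRole p.2 = "user")).map (fun p => (M.length : Int) - 1 - p.1)).getD (k - c - 1).toNat 0)) none) := by
  induction xs with
  | nil =>
    intro s c st h0 hk
    rw [PySem.List.enumerate_nil]
    rw [List.filter_nil, List.map_nil]
    rw [if_pos (by simp; omega)]
    rfl
  | cons x t ih =>
    intro s c st h0 hk
    rw [PySem.List.enumerate_cons]
    by_cases hx : pvRole x = "user"
    · rw [show cbScan M sys k ((s, x) :: PySem.List.enumerate t (s+1)) c st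
            = (if c + 1 > k then sys ++ PySem.List.slice M (some st) none
               else cbScan M sys k (PySem.List.enumerate t (s+1)) (c+1) ((M.length : Int) - 1 - s))
          by rw [cbScan]; rw [if_pos hx]]
      rw [List.filter_cons_of_pos (by simp [hx]), List.map_cons, List.length_cons]
      by_cases hgt : c + 1 > k
      · have hck : c = k := by omega
        rw [if_pos hgt, if_neg (by push_cast; omega), if_pos hck]
      · rw [if_neg hgt]
        rw [ih (s+1) (c+1) ((M.length : Int) - 1 - s) (by omega) (by omega)]
        split_ifs with h1 h2 h3 h4 h5 <;>
          first
          | rfl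
          | (exfalso; push_cast at *; omega)
          | (rw [show (k - c - 1).toNat = 0 from by omega, List.getD_cons_zero])
          | (rw [show (k - c - 1).toNat = (k - (c+1) - 1).toNat + 1 from by omega,
                 List.getD_cons_succ])
    · rw [show cbScan M sys k ((s, x) :: PySem.List.enumerate t (s+1)) c st
            = cbScan M sys k (PySem.List.enumerate t (s+1)) c st
          by rw [cbScan]; rw [if_neg hx]]
      rw [List.filter_cons_of_neg (by simp [hx])]
      exact ih (s+1) c st h0 hk

theorem pv_uI_mem (M : List (List (String × String))) (i : Int)
    (h : i ∈ ((PySem.List.enumerate M 0).filter (fun p => pvRole p.2 = "user")).map (fun p => p.1)) :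
    0 ≤ i ∧ i < (M.length : Int) := by
  obtain ⟨p, hp, rfl⟩ := List.mem_map.1 h
  have hpe : p ∈ PySem.List.enumerate M 0 := (List.mem_filter.1 hp).1
  have : p.1 ∈ (PySem.List.enumerate M 0).map (fun p => p.1) := List.mem_map_of_mem hpe
  rw [PySem.List.map_fst_enumerate] at this
  have := PySem.List.mem_pyRange_one.1 this
  omega

theorem pv_uI_ne_nil (M : List (List (String × String))) (m : List (String × String))
    (hm : m ∈ M) (hu : pvRole m = "user") :
    ((PySem.List.enumerate M 0).filter (fun p => pvRole p.2 = "user")).map (fun p => p.1) ≠ [] := by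
  have : m ∈ (PySem.List.enumerate M 0).map (fun p => p.2) := by
    rw [PySem.List.map_snd_enumerate]; exact hm
  obtain ⟨p, hp, hp2⟩ := List.mem_map.1 this
  have hpf : p ∈ (PySem.List.enumerate M 0).filter (fun p => pvRole p.2 = "user") :=
    List.mem_filter.2 ⟨hp, by simp [hp2, hu]⟩
  intro habs
  rw [List.map_eq_nil_iff] at habs
  simp [habs] at hpf

theorem pv_main (M : List (List (String × String))) (k : Int)
    (hk0 : 0 ≤ k)
    (hND : ¬ (k = 0 ∧ ∃ m ∈ M, PySem.Dict.getD (PySem.Dict.mk m) "role" "" = "user")) :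
    conversation_buffer M k = conversation_buffer_alt M k := by
  by_cases hM : M = []
  · simp [conversation_buffer, conversation_buffer_alt, hM]
  · simp only [conversation_buffer, conversation_buffer_alt, if_neg hM]
    rw [pv_scanSpec M _ k M.reverse 0 0 (M.length : Int) le_rfl hk0]
    have hrev := pv_rev_filter M 0 ((M.length : Int) - 1)
    rw [show (M.length : Int) - 1 - 0 - (M.length : Int) + 1 = 0 by ring] at hrev
    rw [hrev]
    set uI : List Int :=
      ((PySem.List.enumerate M 0).filter (fun p => pvRole p.2 = "user")).map (fun p => p.1) with huI
    rw [List.length_reverse]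
    by_cases hg : (uI.length : Int) ≤ k
    · rw [if_pos hg, if_pos (show (uI.length : Int) + 0 ≤ k by omega)]
    · rw [if_neg hg, if_neg (show ¬ ((uI.length : Int) + 0 ≤ k) by omega)]
      have hk1 : 1 ≤ k := by
        rcases lt_or_ge k 1 with h | h
        · exfalso
          apply hND
          refine ⟨by omega, ?_⟩
          have hne : uI ≠ [] := by
            intro habs; rw [habs] at hg; simp at hg; omega
          obtain ⟨i, hi⟩ := List.exists_mem_of_ne_nil uI hne
          obtain ⟨p, hp, _⟩ := List.mem_map.1 hi
          have hpf := List.mem_filter.1 hp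
          refine ⟨p.2, ?_, by simpa [pvRole] using hpf.2⟩
          have hm2 : p.2 ∈ (PySem.List.enumerate M 0).map (fun p => p.2) := List.mem_map_of_mem hpf.1
          rwa [PySem.List.map_snd_enumerate] at hm2
        · exact h
      -- index arithmetic
      have hkL : k < (uI.length : Int) := by omega
      have hklen : k.toNat ≤ uI.length := by omega
      have hpg : PySem.List.pyGet? uI (-k) = some (uI[uI.length - k.toNat]'(by omega)) := by
        rw [show -k = -((k.toNat : Nat) : Int) by omega]
        rw [PySem.List.pyGet?_neg_natCast uI k.toNat (by omega) hklen]
        exact List.getElem?_eq_getElem (by omega)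
      rw [hpg]
      rw [if_neg (show ¬ (0 : Int) = k by omega)]
      have hval : uI.reverse.getD (k - 0 - 1).toNat 0 = uI[uI.length - k.toNat]'(by omega) := by
        rw [List.getD_eq_getElem uI.reverse 0 (show (k - 0 - 1).toNat < uI.reverse.length by simp; omega)]
        rw [List.getElem_reverse]
        congr 1
        omega
      rw [hval]

theorem pv_tight (M : List (List (String × String))) (k : Int)
    (hk0 : 0 ≤ k)
    (hD : k = 0 ∧ ∃ m ∈ M, PySem.Dict.getD (PySem.Dict.mk m) "role" "" = "user") :
    conversation_buffer M k ≠ conversation_buffer_alt M k := by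
  obtain ⟨rfl, m, hm, hu⟩ := hD
  have hM : M ≠ [] := by rintro rfl; simp at hm
  set uI : List Int :=
    ((PySem.List.enumerate M 0).filter (fun p => pvRole p.2 = "user")).map (fun p => p.1) with huI
  have hne : uI ≠ [] := pv_uI_ne_nil M m hm (by simpa [pvRole] using hu)
  have hlen : 0 < uI.length := List.length_pos_iff.2 hne
  have hA : conversation_buffer M 0
      = (if pvRole (M.headD []) = "system" then [M.headD []] else [])
        ++ PySem.List.slice M (some (uI[0]'hlen)) none := by
    simp only [conversation_buffer, if_neg hM]
    rw [if_neg (show ¬ ((uI.length : Int) ≤ 0) by exact_mod_cast by omega)]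
    rw [show -(0:Int) = 0 by ring, PySem.List.pyGet?_zero,
        List.getElem?_eq_getElem hlen]
  have hB : conversation_buffer_alt M 0
      = (if pvRole (M.headD []) = "system" then [M.headD []] else []) := by
    simp only [conversation_buffer_alt, if_neg hM]
    rw [pv_scanSpec M _ 0 M.reverse 0 0 (M.length : Int) le_rfl le_rfl]
    have hrev := pv_rev_filter M 0 ((M.length : Int) - 1)
    rw [show (M.length : Int) - 1 - 0 - (M.length : Int) + 1 = 0 by ring] at hrev
    rw [hrev, List.length_reverse]
    rw [if_neg (show ¬ ((uI.length : Int) + 0 ≤ 0) by exact_mod_cast by omega)]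
    rw [if_pos rfl]
    rw [PySem.List.slice_from M (Int.natCast_nonneg M.length)]
    simp
  rw [hA, hB]
  have hu0 := pv_uI_mem M (uI[0]'hlen) (List.getElem_mem hlen)
  intro heq
  have := congrArg List.length heq
  rw [List.length_append] at this
  have hsl : (PySem.List.slice M (some (uI[0]'hlen)) none).length = M.length - (uI[0]'hlen).toNat := by
    rw [PySem.List.slice_from M hu0.1]
    simp
  omega

-- ===== VERDICT (by name: the statement is the Claim_ definition above) =====
theorem conversation_buffer_spec : Claim_unchanged_conversation_buffer := by
  intro messages keep_user_message hDom hPre hND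
  rcases hPre with hM | ⟨hk, _⟩
  · subst hM; rfl
  · exact pv_main messages keep_user_message hk
      (by simpa [D_conversation_buffer] using hND)
theorem conversation_buffer_changed : Claim_changed_conversation_buffer := by
  unfold Claim_changed_conversation_buffer; decide
theorem conversation_buffer_tight : Claim_exact_conversation_buffer := by
  intro messages keep_user_message hDom hPre hD
  rcases hPre with hM | ⟨hk, _⟩
  · obtain ⟨_, m, hm, _⟩ := hD
    subst hM; simp at hm
  · exact pv_tight messages keep_user_message hk
      (by simpa [D_conversation_buffer] using hD)
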